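-- pv_equiv track=rewrite | github.com/Rahul-chunduru/Combinatorial | lexchain.py | lister
-- ===== SOURCE A (Python) =====
-- def lister(s):
-- 	if(s == ''):
-- 		return [] ;
-- 	else:
-- 		a = s[-1]
-- 		c = lister(s[0:-1])
-- 		c.append(a)
-- 		return c;
-- ===== SOURCE B (Python) =====
-- def lister(s):
--     out = []
--     for ch in s:
--         out.append(ch)
--     return out
-- ===== Notes on version B (the rewrite author's own statement) =====
-- stated objective: faster
-- what changed: Replaces A's tail-peeling linear recursion (slice off the last char, recurse, append) — O(n^2) from repeated slicing — with a single forward iteration appending each character to an accumulator, O(n).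
import Mathlib
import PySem

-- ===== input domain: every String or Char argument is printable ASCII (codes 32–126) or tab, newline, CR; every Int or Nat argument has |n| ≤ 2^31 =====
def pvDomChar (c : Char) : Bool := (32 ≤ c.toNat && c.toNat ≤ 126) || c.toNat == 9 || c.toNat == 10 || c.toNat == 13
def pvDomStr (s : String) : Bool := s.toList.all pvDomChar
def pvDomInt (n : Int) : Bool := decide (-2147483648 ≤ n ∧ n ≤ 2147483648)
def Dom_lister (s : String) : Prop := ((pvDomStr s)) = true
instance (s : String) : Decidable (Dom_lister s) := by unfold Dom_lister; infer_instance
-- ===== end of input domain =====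

-- B replaces A's tail-peeling recursion with one forward accumulator loop (simpler; return value only).

-- ===== PORT A =====
-- A recurses on the string: s[-1] is the last character, s[0:-1] drops it (exact for
-- nonempty s); ported over the code-point list, recursing on dropLast as A does.
def listerA (l : List Char) : List String :=
  if h : l = [] then []
  else
    let a := String.ofList [l.getLast h]
    let c := listerA l.dropLast
    c ++ [a]
termination_by l.length
decreasing_by
  have : l.length ≠ 0 := by simpa [List.length_eq_zero_iff] using h
  simp [List.length_dropLast]; omega

def lister (s : String) : List String := listerA s.toList

-- ===== PORT B =====
-- out = []; for ch in s: out.append(ch); return out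
def lister_alt (s : String) : List String :=
  s.toList.foldl (fun out ch => out ++ [String.ofList [ch]]) []

-- ===== PRECONDITION & SPEC =====
def Spec_lister (s : String) (out : List String) : Prop := out = lister_alt s
instance (s : String) (out : List String) : Decidable (Spec_lister s out) := by unfold Spec_lister; infer_instance

-- ===== CLAIM (what is proved, stated in full; the proofs are below) =====
def Claim_equal_lister : Prop := ∀ (s : String), Dom_lister s → Spec_lister s (lister s)

-- ===== LEMMAS AND PROOFS =====
theorem foldl_append_map (l : List Char) (acc : List String) :
    l.foldl (fun out ch => out ++ [String.ofList [ch]]) acc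
      = acc ++ l.map (fun ch => String.ofList [ch]) := by
  induction l generalizing acc with
  | nil => simp
  | cons c cs ih => simp [List.foldl_cons, ih]

theorem listerA_eq_map (l : List Char) :
    listerA l = l.map (fun ch => String.ofList [ch]) := by
  induction l using List.reverseRecOn with
  | nil => simp [listerA]
  | append_singleton xs x ih =>
      rw [listerA]
      simp [ih]

-- ===== VERDICT (by name: the statement is the Claim_ definition above) =====
theorem lister_spec : Claim_equal_lister := by
  intro s _
  unfold Spec_lister lister lister_alt
  rw [listerA_eq_map, foldl_append_map]
  simp
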